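-- pv_equiv track=rewrite | github.com/rbgus4560/AI_SoftWare | Program/BowlingGameScoreboard/ui_formatter.py | get_frame_displays
-- ===== SOURCE A (Python) =====
-- def get_frame_displays(rolls):
--     frames = []
--     idx = 0
--
--     for f in range(10):
--         if idx >= len(rolls):
--             break
--
--         # 1~9 프레임 변환 로직
--         if f < 9:
--             if rolls[idx] == 10:
--                 frames.append(['X', '']) # 스트라이크
--                 idx += 1
--             elif idx + 1 < len(rolls):
--                 r1, r2 = rolls[idx], rolls[idx+1]
--                 d1 = '-' if r1 == 0 else str(r1)
--                 d2 = '/' if r1 + r2 == 10 else ('-' if r2 == 0 else str(r2)) # 스페어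
--                 frames.append([d1, d2])
--                 idx += 2
--             else:
--                 d1 = '-' if rolls[idx] == 0 else str(rolls[idx])
--                 frames.append([d1, ''])
--                 idx += 1
--
--         # 10 프레임 변환 로직
--         else:
--             frame_rolls = rolls[idx:]
--             disp_rolls = []
--
--             for i, r in enumerate(frame_rolls):
--                 if r == 10:
--                     disp_rolls.append('X')
--                 elif i == 1 and frame_rolls[0] + frame_rolls[1] == 10 and frame_rolls[0] != 10:
--                     disp_rolls.append('/')
--                 elif i == 2 and frame_rolls[1] != 10 and frame_rolls[1] + frame_rolls[2] == 10:
--                     disp_rolls.append('/')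
--                 else:
--                     disp_rolls.append('-' if r == 0 else str(r))
--
--             while len(disp_rolls) < 3:
--                 disp_rolls.append('')
--             frames.append(disp_rolls)
--
--     return frames
-- ===== SOURCE B (Python) =====
-- def _sym(r):
--     return '-' if r == 0 else str(r)
--
--
-- def _tenth(t):
--     # pair every roll with its predecessor (sentinel 10 before the first roll,
--     # never used since '/' needs position >= 1)
--     syms = ['X' if r == 10 else
--             '/' if 0 < i <= 2 and p != 10 and p + r == 10 else
--             _sym(r)
--             for i, (p, r) in enumerate(zip([10] + t, t))]
--     return syms + [''] * (3 - len(syms))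
--
--
-- def _go(n, rs):
--     # structural recursion on the roll list; n = regular frames still allowed
--     if not rs:
--         return []
--     if n == 0:
--         return [_tenth(rs)]
--     r1, *rest = rs
--     if r1 == 10:
--         return [['X', '']] + _go(n - 1, rest)
--     if not rest:
--         return [[_sym(r1), '']]
--     r2, *rest2 = rest
--     return [[_sym(r1), '/' if r1 + r2 == 10 else _sym(r2)]] + _go(n - 1, rest2)
--
--
-- def get_frame_displays(rolls):
--     return _go(9, list(rolls))
-- ===== Notes on version B (the rewrite author's own statement) =====
-- stated objective: alternative
-- what changed: Replaced A's imperative range(10) index walk with break and slicing by a structural recursion that pattern-matches the head of the roll list (consing frames onto the recursive result), and replaced A's three index-specific tenth-frame spare conditions by one zip-with-predecessor comprehension.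
import Mathlib
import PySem

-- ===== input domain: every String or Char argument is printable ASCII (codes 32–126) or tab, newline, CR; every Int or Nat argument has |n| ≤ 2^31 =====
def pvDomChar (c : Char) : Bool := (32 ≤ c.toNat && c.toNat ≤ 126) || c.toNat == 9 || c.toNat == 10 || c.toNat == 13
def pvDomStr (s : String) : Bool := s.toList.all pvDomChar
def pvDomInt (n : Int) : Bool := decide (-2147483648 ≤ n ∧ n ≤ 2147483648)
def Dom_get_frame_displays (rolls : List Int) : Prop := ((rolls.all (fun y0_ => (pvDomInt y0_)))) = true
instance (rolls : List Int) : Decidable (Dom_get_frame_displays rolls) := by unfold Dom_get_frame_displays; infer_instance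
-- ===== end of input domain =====

-- B replaces A's imperative index walk (range(10) loop with break and slicing) by a structural
-- recursion that pattern-matches the head of the roll list, and unifies the tenth-frame spare
-- conditions into one zip-with-predecessor pass (alternative decomposition, same cost).

-- ===== PORT A =====

-- the inner `for i, r in enumerate(frame_rolls)` loop of the tenth frame
def tenthDispA (fr : List Int) : List String :=
  (PySem.List.enumerate fr).map (fun p =>
    if p.2 = 10 then "X"
    else if p.1 = 1 ∧ fr.getD 0 0 + fr.getD 1 0 = 10 ∧ fr.getD 0 0 ≠ 10 then "/"
    else if p.1 = 2 ∧ fr.getD 1 0 ≠ 10 ∧ fr.getD 1 0 + fr.getD 2 0 = 10 then "/"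
    else if p.2 = 0 then "-" else PySem.Int.toStr p.2)

-- the `while len(disp_rolls) < 3: append('')` loop
def padA (l : List String) : List String :=
  if l.length < 3 then padA (l ++ [""]) else l
termination_by 3 - l.length
decreasing_by simp; omega

-- the `for f in range(10)` loop; fuel = remaining regular frames (9 at start), fuel 0 = f == 9
def aLoop (rolls : List Int) : Nat → Nat → List (List String) → List (List String)
  | 0, idx, frames =>
      if idx ≥ rolls.length then frames
      else frames ++ [padA (tenthDispA (rolls.drop idx))]
  | n+1, idx, frames =>
      if idx ≥ rolls.length then frames
      else if rolls.getD idx 0 = 10 then aLoop rolls n (idx+1) (frames ++ [["X", ""]])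
      else if idx + 1 < rolls.length then
        let r1 := rolls.getD idx 0
        let r2 := rolls.getD (idx+1) 0
        let d1 := if r1 = 0 then "-" else PySem.Int.toStr r1
        let d2 := if r1 + r2 = 10 then "/" else if r2 = 0 then "-" else PySem.Int.toStr r2
        aLoop rolls n (idx+2) (frames ++ [[d1, d2]])
      else
        let d1 := if rolls.getD idx 0 = 0 then "-" else PySem.Int.toStr (rolls.getD idx 0)
        aLoop rolls n (idx+1) (frames ++ [[d1, ""]])

def get_frame_displays (rolls : List Int) : List (List String) :=
  aLoop rolls 9 0 []

-- ===== PORT B =====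

-- Source B `_sym`
def symB (r : Int) : String := if r = 0 then "-" else PySem.Int.toStr r

-- Source B `_tenth`: one comprehension over zip([10]+t, t) pairing each roll with its predecessor
def tenthB (t : List Int) : List String :=
  let syms := (PySem.List.enumerate (List.zip ((10 : Int) :: t) t)).map (fun p =>
    if p.2.2 = 10 then "X"
    else if 0 < p.1 ∧ p.1 ≤ 2 ∧ p.2.1 ≠ 10 ∧ p.2.1 + p.2.2 = 10 then "/"
    else symB p.2.2)
  syms ++ List.replicate (3 - syms.length) ""

-- Source B `_go`: structural recursion on the roll list, n = regular frames still allowed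
def goB : Nat → List Int → List (List String)
  | _, [] => []
  | 0, rs => [tenthB rs]
  | n+1, r1 :: rest =>
      if r1 = 10 then ["X", ""] :: goB n rest
      else
        match rest with
        | [] => [[symB r1, ""]]
        | r2 :: rest2 => [symB r1, if r1 + r2 = 10 then "/" else symB r2] :: goB n rest2

def get_frame_displays_alt (rolls : List Int) : List (List String) :=
  goB 9 rolls

-- ===== PRECONDITION & SPEC =====
def Spec_get_frame_displays (rolls : List Int) (out : List (List String)) : Prop := out = get_frame_displays_alt rolls
instance (rolls : List Int) (out : List (List String)) : Decidable (Spec_get_frame_displays rolls out) := by unfold Spec_get_frame_displays; infer_instance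

-- ===== CLAIM (what is proved, stated in full; the proofs are below) =====
def Claim_equal_get_frame_displays : Prop := ∀ (rolls : List Int), Dom_get_frame_displays rolls → Spec_get_frame_displays rolls (get_frame_displays rolls)

-- ===== LEMMAS AND PROOFS =====

theorem pad_eq (l : List String) : padA l = l ++ List.replicate (3 - l.length) "" := by
  rw [padA]
  by_cases h : l.length < 3
  · rw [if_pos h, pad_eq (l ++ [""])]
    have h1 : 3 - l.length = (3 - (l.length + 1)) + 1 := by omega
    rw [h1, List.replicate_succ]
    simp
  · rw [if_neg h]
    have h3 : 3 - l.length = 0 := by omega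
    simp [h3]
termination_by 3 - l.length
decreasing_by simp; omega

theorem tenth_eq (t : List Int) : padA (tenthDispA t) = tenthB t := by
  rw [pad_eq]
  unfold tenthB tenthDispA
  have hmaps : (PySem.List.enumerate t).map (fun p =>
      if p.2 = 10 then "X"
      else if p.1 = 1 ∧ t.getD 0 0 + t.getD 1 0 = 10 ∧ t.getD 0 0 ≠ 10 then "/"
      else if p.1 = 2 ∧ t.getD 1 0 ≠ 10 ∧ t.getD 1 0 + t.getD 2 0 = 10 then "/"
      else if p.2 = 0 then "-" else PySem.Int.toStr p.2) =
    (PySem.List.enumerate (List.zip ((10 : Int) :: t) t)).map (fun p =>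
      if p.2.2 = 10 then "X"
      else if 0 < p.1 ∧ p.1 ≤ 2 ∧ p.2.1 ≠ 10 ∧ p.2.1 + p.2.2 = 10 then "/"
      else symB p.2.2) := by
    apply List.ext_getElem
    · simp [PySem.List.length_enumerate]
    · intro k hk1 hk2
      have hkt : k < t.length := by
        simpa [PySem.List.length_enumerate] using hk1
      have hz : k < (List.zip ((10 : Int) :: t) t).length := by
        simp; omega
      rw [List.getElem_map, List.getElem_map,
          PySem.List.getElem_enumerate, PySem.List.getElem_enumerate,
          List.getElem_zip]
      simp only [Int.zero_add, symB]
      match k, hkt with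
      | 0, hkt => norm_num
      | 1, hkt =>
        have hg0 : t.getD 0 0 = t[0] := List.getD_eq_getElem t 0 (by omega)
        have hg1 : t.getD 1 0 = t[1] := List.getD_eq_getElem t 0 hkt
        norm_num [hg0, hg1, List.getElem_cons_succ]
        split_ifs with h1 h2 h3 <;> simp_all
      | 2, hkt =>
        have hg1 : t.getD 1 0 = t[1] := List.getD_eq_getElem t 0 (by omega)
        have hg2 : t.getD 2 0 = t[2] := List.getD_eq_getElem t 0 hkt
        norm_num [hg1, hg2, List.getElem_cons_succ]
        split_ifs with h1 h2 h3 <;> simp_all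
      | (m+3), hkt =>
        have e1 : ¬((m : Int)+3 = 1) := by omega
        have e2 : ¬((m : Int)+3 = 2) := by omega
        have e3 : ¬((m : Int)+3 ≤ 2) := by omega
        norm_num [e1, e2, e3]
  rw [hmaps]

theorem main_lemma (rolls : List Int) (n : Nat) (idx : Nat) (frames : List (List String)) :
    aLoop rolls n idx frames = frames ++ goB n (rolls.drop idx) := by
  induction n generalizing idx frames with
  | zero =>
    simp only [aLoop]
    by_cases h : idx ≥ rolls.length
    · have hnil : rolls.drop idx = [] := List.drop_eq_nil_of_le h
      simp [h, hnil, goB]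
    · have hlt : idx < rolls.length := by omega
      have hdrop : rolls.drop idx = rolls[idx] :: rolls.drop (idx+1) := List.drop_eq_getElem_cons hlt
      rw [if_neg h, hdrop]
      simp only [goB]
      rw [← hdrop, tenth_eq]
  | succ n ih =>
    simp only [aLoop]
    by_cases h : idx ≥ rolls.length
    · have hnil : rolls.drop idx = [] := List.drop_eq_nil_of_le h
      simp [h, hnil, goB]
    · have hlt : idx < rolls.length := by omega
      have hdrop : rolls.drop idx = rolls[idx] :: rolls.drop (idx+1) := List.drop_eq_getElem_cons hlt
      have hget : rolls.getD idx 0 = rolls[idx] := List.getD_eq_getElem rolls 0 hlt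
      have hsome : rolls[idx]? = some rolls[idx] := List.getElem?_eq_getElem hlt
      rw [if_neg h, hdrop]
      simp only [goB]
      by_cases h10 : rolls.getD idx 0 = 10
      · have h10' : rolls[idx] = (10 : Int) := hget ▸ h10
        rw [if_pos h10, if_pos h10', ih]
        simp
      · have h10' : ¬ rolls[idx] = (10 : Int) := fun hc => h10 (hget.trans hc)
        rw [if_neg h10, if_neg h10']
        by_cases h2 : idx + 1 < rolls.length
        · have hdrop1 : rolls.drop (idx+1) = rolls[idx+1] :: rolls.drop (idx+2) :=
            List.drop_eq_getElem_cons h2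
          have hget1 : rolls.getD (idx+1) 0 = rolls[idx+1] := List.getD_eq_getElem rolls 0 h2
          have hsome1 : rolls[idx+1]? = some rolls[idx+1] := List.getElem?_eq_getElem h2
          rw [if_pos h2, hdrop1, ih]
          simp [symB, hsome, hsome1]
        · have hnil1 : rolls.drop (idx+1) = [] := List.drop_eq_nil_of_le (by omega)
          rw [if_neg h2, hnil1, ih, hnil1]
          simp [symB, hsome, goB]

-- ===== VERDICT (by name: the statement is the Claim_ definition above) =====
theorem get_frame_displays_spec : Claim_equal_get_frame_displays := by
  intro rolls _
  unfold Spec_get_frame_displays get_frame_displays get_frame_displays_alt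
  simpa using main_lemma rolls 9 0 []
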